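-- pv_equiv track=rewrite | github.com/nbice/whole-clove-recipes | scripts/build.py | _render_category_tiles
-- ===== SOURCE A (Python) =====
-- def slugify(text):
--     return text.lower().replace(" ", "-")
--
-- def _render_category_tiles(recipes, indent="        "):
--     by_cat = {}
--     for r in recipes:
--         by_cat.setdefault(r["category"], []).append(r)
--     html = f'{indent}<ul class="category-tiles">\n'
--     for cat in sorted(by_cat):
--         count = len(by_cat[cat])
--         noun = "recipe" if count == 1 else "recipes"
--         html += (
--             f'{indent}    <li><a href="/{slugify(cat)}">'
--             f'<span class="category-tile-name">{cat}</span>'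
--             f'<span class="category-tile-count">{count} {noun}</span>'
--             f'</a></li>\n'
--         )
--     html += f'{indent}</ul>\n'
--     return html
-- ===== SOURCE B (Python) =====
-- def slugify(text):
--     return text.lower().replace(" ", "-")
--
-- def _render_category_tiles(recipes, indent="        "):
--     # Sort the category names once; equal categories are then adjacent, so one
--     # run-length scan over the sorted list replaces the dict index entirely.
--     cats = sorted(r["category"] for r in recipes)
--     html = f'{indent}<ul class="category-tiles">\n'
--     i = 0
--     n = len(cats)
--     while i < n:
--         cat = cats[i]
--         j = i
--         while j < n and cats[j] == cat:
--             j += 1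
--         count = j - i
--         noun = "recipe" if count == 1 else "recipes"
--         html += (
--             f'{indent}    <li><a href="/{slugify(cat)}">'
--             f'<span class="category-tile-name">{cat}</span>'
--             f'<span class="category-tile-count">{count} {noun}</span>'
--             f'</a></li>\n'
--         )
--         i = j
--     html += f'{indent}</ul>\n'
--     return html
-- ===== Notes on version B (the rewrite author's own statement) =====
-- stated objective: alternative
-- what changed: B drops the dict index entirely: it sorts the category names once and emits the tiles in a single run-length scan over the sorted list, instead of grouping into a dict and then iterating over its sorted keys.
import Mathlib
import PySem

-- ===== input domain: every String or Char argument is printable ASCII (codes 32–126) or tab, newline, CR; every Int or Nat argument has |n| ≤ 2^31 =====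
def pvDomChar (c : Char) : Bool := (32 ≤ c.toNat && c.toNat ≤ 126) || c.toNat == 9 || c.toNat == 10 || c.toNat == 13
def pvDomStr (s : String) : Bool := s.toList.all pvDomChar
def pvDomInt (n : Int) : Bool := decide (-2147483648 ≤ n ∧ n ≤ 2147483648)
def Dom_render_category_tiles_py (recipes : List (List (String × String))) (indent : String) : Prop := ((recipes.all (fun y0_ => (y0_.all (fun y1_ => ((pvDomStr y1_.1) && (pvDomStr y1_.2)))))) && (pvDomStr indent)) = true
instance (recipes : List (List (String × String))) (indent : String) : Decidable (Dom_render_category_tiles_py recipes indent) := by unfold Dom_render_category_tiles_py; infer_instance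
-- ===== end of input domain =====

-- B replaces A's dict-of-lists grouping by a sort of the category names followed by one
-- run-length scan (alternative decomposition, same O(n log n) cost); return values proved equal.

-- shared helpers: both Pythons define the same `slugify`, read `r["category"]` and build the
-- same f-string tile line, so those are shared helper defs used by both ports.
def slugify (text : String) : String :=
  PySem.Str.replace (PySem.Str.lower text) " " "-"

def catKey (r : List (String × String)) : String :=
  (PySem.Dict.mk r).getD "category" ""   -- r["category"]; Pre_ guarantees the key is present

def tileLine (indent cat : String) (count : Int) : String :=
  indent ++ "    <li><a href=\"/" ++ slugify cat ++ "\">" ++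
    "<span class=\"category-tile-name\">" ++ cat ++ "</span>" ++
    "<span class=\"category-tile-count\">" ++ PySem.Int.toStr count ++ " " ++
    (if count == 1 then "recipe" else "recipes") ++ "</span>" ++ "</a></li>\n"

-- ===== PORT A =====
def render_category_tiles_py (recipes : List (List (String × String))) (indent : String) : String :=
  -- by_cat.setdefault(cat, []).append(r)  ≡  by_cat[cat] = by_cat.get(cat, []) + [r]  (Dict.modify)
  let by_cat : PySem.Dict String (List (List (String × String))) :=
    recipes.foldl (fun d r => d.modify (catKey r) [] (fun l => l ++ [r])) PySem.Dict.empty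
  let html := indent ++ "<ul class=\"category-tiles\">\n"
  let html := (PySem.List.sorted by_cat.keys (fun k => k)).foldl
      (fun h cat => h ++ tileLine indent cat (PySem.List.len (by_cat.getD cat []))) html
  html ++ (indent ++ "</ul>\n")

-- ===== PORT B =====
-- the outer while loop of Source B: one run of equal categories per step (inner while = takeWhile/dropWhile)
def bLoop (indent : String) : List String → String → String
  | [], html => html
  | c :: rest, html =>
      bLoop indent (rest.dropWhile (fun x => x == c))
        (html ++ tileLine indent c (1 + ((rest.takeWhile (fun x => x == c)).length : Int)))
termination_by l => l.length
decreasing_by exact Nat.lt_succ_of_le (List.length_dropWhile_le _ _)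

def render_category_tiles_py_alt (recipes : List (List (String × String))) (indent : String) : String :=
  let cats := PySem.List.sorted (recipes.map catKey) (fun c => c)
  bLoop indent cats (indent ++ "<ul class=\"category-tiles\">\n") ++ (indent ++ "</ul>\n")

-- ===== PRECONDITION & SPEC =====
-- Pre_ excludes exactly the recipes lacking a "category" key, on which both Pythons raise KeyError.
def Pre_render_category_tiles_py (recipes : List (List (String × String))) (indent : String) : Prop :=
  ∀ r ∈ recipes, (PySem.Dict.mk r).contains "category" = true
instance (recipes : List (List (String × String))) (indent : String) : Decidable (Pre_render_category_tiles_py recipes indent) := by unfold Pre_render_category_tiles_py; infer_instance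

def pvWitness_render_category_tiles_py : (List (List (String × String))) × String :=
  ([[("category", "Soups"), ("title", "Pho")], [("category", "Soups")], [("category", "Bread")]], "  ")

def Spec_render_category_tiles_py (recipes : List (List (String × String))) (indent : String) (out : String) : Prop := out = render_category_tiles_py_alt recipes indent
instance (recipes : List (List (String × String))) (indent : String) (out : String) : Decidable (Spec_render_category_tiles_py recipes indent out) := by unfold Spec_render_category_tiles_py; infer_instance

-- ===== CLAIM (what is proved, stated in full; the proofs are below) =====
def Claim_equal_render_category_tiles_py : Prop := ∀ (recipes : List (List (String × String))) (indent : String), Dom_render_category_tiles_py recipes indent → Pre_render_category_tiles_py recipes indent → Spec_render_category_tiles_py recipes indent (render_category_tiles_py recipes indent)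

-- ===== LEMMAS AND PROOFS =====

-- the distinct run heads of a list (for a sorted list: its distinct elements in order)
def heads : List String → List String
  | [] => []
  | c :: rest => c :: heads (rest.dropWhile (fun x => x == c))
termination_by l => l.length
decreasing_by exact Nat.lt_succ_of_le (List.length_dropWhile_le _ _)

lemma lt_of_mem_dropWhile {c : String} {rest : List String}
    (hp : (c :: rest).Pairwise (· ≤ ·)) :
    ∀ x ∈ rest.dropWhile (fun y => y == c), c < x := by
  induction rest with
  | nil => simp
  | cons y rest' ih =>
    have hcy : c ≤ y := (List.pairwise_cons.mp hp).1 y (by simp)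
    by_cases hyc : (y == c) = true
    · have : y = c := by simpa using hyc
      subst this
      rw [List.dropWhile_cons, if_pos hyc]
      apply ih
      rcases List.pairwise_cons.mp hp with ⟨h1, h2⟩
      exact List.pairwise_cons.mpr ⟨fun z hz => h1 z (by simp [hz]),
        (List.pairwise_cons.mp h2).2⟩
    · rw [List.dropWhile_cons, if_neg hyc]
      intro x hx
      have hcy' : c < y := lt_of_le_of_ne hcy (by
        intro h; exact hyc (by simp [h.symm]))
      rcases hx with _ | hx'
      · exact hcy'
      · rename_i hx'
        have hyx : y ≤ x := by
          rcases List.pairwise_cons.mp hp with ⟨_, h2⟩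
          exact (List.pairwise_cons.mp h2).1 x (by assumption)
        exact lt_of_lt_of_le hcy' hyx

lemma heads_subset : ∀ (l : List String), ∀ x ∈ heads l, x ∈ l := by
  intro l
  induction l using heads.induct with
  | case1 => simp [heads]
  | case2 c rest ih =>
    intro x hx
    rw [heads] at hx
    rcases hx with _ | hx'
    · simp
    · rename_i hx'
      have := ih x hx'
      exact List.mem_cons_of_mem _ ((rest.dropWhile_sublist _).mem this)

lemma mem_heads : ∀ (l : List String), l.Pairwise (· ≤ ·) → ∀ x ∈ l, x ∈ heads l := by
  intro l
  induction l using heads.induct with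
  | case1 => simp
  | case2 c rest ih =>
    intro hp x hx
    rw [heads]
    rcases hx with _ | hx'
    · simp
    · rename_i hx'
      rw [← List.takeWhile_append_dropWhile (p := fun y => y == c) (l := rest)] at hx'
      rcases List.mem_append.mp hx' with h | h
      · have : x = c := by simpa using List.mem_takeWhile_imp h
        simp [this]
      · have hp' : (rest.dropWhile (fun y => y == c)).Pairwise (· ≤ ·) :=
          (List.pairwise_cons.mp hp).2.sublist (rest.dropWhile_sublist _)
        exact List.mem_cons_of_mem _ (ih hp' x h)

lemma heads_pairwise_lt : ∀ (l : List String), l.Pairwise (· ≤ ·) →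
    (heads l).Pairwise (· < ·) := by
  intro l
  induction l using heads.induct with
  | case1 => simp [heads]
  | case2 c rest ih =>
    intro hp
    rw [heads]
    have hp' : (rest.dropWhile (fun y => y == c)).Pairwise (· ≤ ·) :=
      (List.pairwise_cons.mp hp).2.sublist (rest.dropWhile_sublist _)
    refine List.pairwise_cons.mpr ⟨?_, ih hp'⟩
    intro x hx
    exact lt_of_mem_dropWhile hp x (heads_subset _ x hx)

lemma count_head_run {c : String} {rest : List String}
    (hp : (c :: rest).Pairwise (· ≤ ·)) :
    (c :: rest).count c = 1 + (rest.takeWhile (fun x => x == c)).length := by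
  have hdw : (rest.dropWhile (fun y => y == c)).count c = 0 := by
    rw [List.count_eq_zero]
    intro hmem
    exact absurd rfl (ne_of_gt (lt_of_mem_dropWhile hp c hmem))
  have htw : (rest.takeWhile (fun y => y == c)).count c =
      (rest.takeWhile (fun y => y == c)).length := by
    rw [List.count, List.countP_eq_length]
    intro a ha
    have : a = c := by simpa using List.mem_takeWhile_imp ha
    simp [this]
  have hsplit := List.takeWhile_append_dropWhile (p := fun y => y == c) (l := rest)
  have hrest : rest.count c = (rest.takeWhile (fun x => x == c)).length := by
    conv_lhs => rw [← hsplit]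
    rw [List.count_append, hdw, htw]
    omega
  simp only [List.count_cons, BEq.rfl, if_true]
  omega

lemma count_tail_run {c x : String} {rest : List String}
    (hp : (c :: rest).Pairwise (· ≤ ·))
    (hx : x ∈ rest.dropWhile (fun y => y == c)) :
    (rest.dropWhile (fun y => y == c)).count x = (c :: rest).count x := by
  have hcx : c < x := lt_of_mem_dropWhile hp x hx
  have hxc : x ≠ c := ne_of_gt hcx
  have htw : (rest.takeWhile (fun y => y == c)).count x = 0 := by
    rw [List.count_eq_zero]
    intro hmem
    have : x = c := by simpa using List.mem_takeWhile_imp hmem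
    exact hxc this
  have := List.takeWhile_append_dropWhile (p := fun y => y == c) (l := rest)
  calc (rest.dropWhile (fun y => y == c)).count x
      = (rest.takeWhile (fun y => y == c)).count x +
        (rest.dropWhile (fun y => y == c)).count x := by rw [htw]; omega
    _ = rest.count x := by rw [← List.count_append, this]
    _ = (c :: rest).count x := by simp [Ne.symm hxc]

lemma bLoop_eq_foldl_heads (indent : String) :
    ∀ (n : Nat) (l : List String), l.length ≤ n → l.Pairwise (· ≤ ·) → ∀ html,
      bLoop indent l html =
        (heads l).foldl (fun h c => h ++ tileLine indent c (l.count c : Int)) html := by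
  intro n
  induction n with
  | zero =>
    intro l hl _ html
    have : l = [] := List.eq_nil_of_length_eq_zero (Nat.le_zero.mp hl)
    subst this
    simp [bLoop, heads]
  | succ n ih =>
    intro l hl hp html
    cases l with
    | nil => simp [bLoop, heads]
    | cons c rest =>
      rw [bLoop, heads, List.foldl_cons]
      have hp' : (rest.dropWhile (fun y => y == c)).Pairwise (· ≤ ·) :=
        (List.pairwise_cons.mp hp).2.sublist (rest.dropWhile_sublist _)
      have hlen : (rest.dropWhile (fun y => y == c)).length ≤ n :=
        le_trans (List.length_dropWhile_le _ _) (Nat.le_of_succ_le_succ hl)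
      rw [ih _ hlen hp']
      have hcnt : ((c :: rest).count c : Int)
          = 1 + ((rest.takeWhile (fun x => x == c)).length : Int) := by
        rw [count_head_run hp]; push_cast; ring
      rw [← hcnt]
      apply PySem.List.foldl_congr_mem
      intro acc x hx
      rw [count_tail_run hp (heads_subset _ x hx)]

lemma sorted_keys_eq_heads (cats : List String) :
    PySem.List.sorted (PySem.Set.ofList cats) (fun k => k) =
      heads (PySem.List.sorted cats (fun c => c)) := by
  have hsp : (PySem.List.sorted cats (fun c => c)).Pairwise (· ≤ ·) :=
    PySem.List.sorted_pairwise cats (fun c => c)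
  have hlt := heads_pairwise_lt _ hsp
  apply PySem.List.sorted_eq_of_perm_of_pairwise_lt
  · rw [List.perm_ext_iff_of_nodup (hlt.imp ne_of_lt) (PySem.Set.nodup_ofList cats)]
    intro x
    constructor
    · intro hx
      rw [PySem.Set.mem_ofList]
      have := heads_subset _ x hx
      rwa [PySem.List.mem_sorted] at this
    · intro hx
      rw [PySem.Set.mem_ofList] at hx
      exact mem_heads _ hsp x ((PySem.List.mem_sorted _ _ _ _).mpr hx)
  · exact hlt

lemma by_cat_count (recipes : List (List (String × String))) (c : String) :
    ((recipes.foldl (fun d r => d.modify (catKey r) [] (fun l => l ++ [r]))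
        PySem.Dict.empty).getD c []).length = (recipes.map catKey).count c := by
  have h := PySem.Dict.getD_foldl_modify_append
      (recipes.map (fun r => (catKey r, r))) PySem.Dict.empty c
  rw [List.foldl_map] at h
  rw [h]
  simp only [PySem.Dict.getD_empty, List.nil_append, List.length_map]
  rw [← List.countP_eq_length_filter, List.countP_map, List.count, List.countP_map]
  simp [Function.comp_def]

-- ===== VERDICT (by name: the statement is the Claim_ definition above) =====
theorem render_category_tiles_py_spec : Claim_equal_render_category_tiles_py := by
  intro recipes indent _ _
  unfold Spec_render_category_tiles_py render_category_tiles_py render_category_tiles_py_alt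
  simp only []
  have hkeys : (recipes.foldl (fun d r => d.modify (catKey r) [] (fun l => l ++ [r]))
      PySem.Dict.empty).keys = PySem.Set.ofList (recipes.map catKey) := by
    rw [PySem.Dict.keys_foldl_modify_key recipes catKey [] (fun _ r l => l ++ [r])]
    rfl
  rw [hkeys, sorted_keys_eq_heads]
  have hsp : (PySem.List.sorted (recipes.map catKey) (fun c => c)).Pairwise (· ≤ ·) :=
    PySem.List.sorted_pairwise _ _
  rw [bLoop_eq_foldl_heads indent (PySem.List.sorted (recipes.map catKey) (fun c => c)).length
    _ le_rfl hsp]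
  congr 1
  apply PySem.List.foldl_congr_mem
  intro acc x hx
  rw [PySem.List.len_eq, by_cat_count,
    ((PySem.List.sorted_perm (recipes.map catKey) (fun c => c) false).count_eq x)]
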